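-- pv_equiv track=rewrite | github.com/torokar/api-parsing | modules/http_codes.py | for_dict
-- ===== SOURCE A (Python) =====
-- def for_dict(list_text_website):
--     """Парсинг данных кодов в словарь"""
--     code_dict = {}
--     for code_text in range(len(list_text_website)):
--         if ':' in list_text_website[code_text]:
--             index_cut = code_text
--             while True:
--                 find_number = list_text_website[index_cut]
--                 if find_number.isdigit():
--                     break
--                 else:
--                     index_cut -= 1
--
--             end_index = min(code_text + 1, index_cut + 3)
--             cut_key = ' '.join(list_text_website[index_cut:end_index])
--
--             index_val = code_text + 1
--             while index_val < len(list_text_website):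
--                 find_number = list_text_website[index_val]
--                 if find_number.isdigit():
--                     break
--                 else:
--                     index_val += 1
--
--             cut_val = ' '.join(list_text_website[code_text + 1:index_val])
--             code_dict[cut_key] = cut_val
--     return code_dict
-- ===== SOURCE B (Python) =====
-- def for_dict(list_text_website):
--     """Парсинг данных кодов в словарь"""
--     n = len(list_text_website)
--     digs = [j for j, s in enumerate(list_text_website) if s.isdigit()]
--     code_dict = {}
--     k = 0
--     for i, s in enumerate(list_text_website):
--         if ':' not in s:
--             continue
--         while k < len(digs) and digs[k] <= i:
--             k += 1
--         if k == 0: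
--             continue  # no code line precedes this description line
--         p = digs[k - 1]
--         nxt = digs[k] if k < len(digs) else n
--         key = ' '.join(list_text_website[p:min(i + 1, p + 3)])
--         code_dict[key] = ' '.join(list_text_website[i + 1:nxt])
--     return code_dict
-- ===== Notes on version B (the rewrite author's own statement) =====
-- stated objective: alternative
-- what changed: B precomputes the sorted list of all-digit line indices once and walks it with a single monotone pointer, replacing A's per-':'-line backward while-scan (with negative-index wraparound) and forward while-scan.
-- outside the precondition, e.g. on for_dict(['a:', '5']): A returns {'': ''}, B returns {}
import Mathlib
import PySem

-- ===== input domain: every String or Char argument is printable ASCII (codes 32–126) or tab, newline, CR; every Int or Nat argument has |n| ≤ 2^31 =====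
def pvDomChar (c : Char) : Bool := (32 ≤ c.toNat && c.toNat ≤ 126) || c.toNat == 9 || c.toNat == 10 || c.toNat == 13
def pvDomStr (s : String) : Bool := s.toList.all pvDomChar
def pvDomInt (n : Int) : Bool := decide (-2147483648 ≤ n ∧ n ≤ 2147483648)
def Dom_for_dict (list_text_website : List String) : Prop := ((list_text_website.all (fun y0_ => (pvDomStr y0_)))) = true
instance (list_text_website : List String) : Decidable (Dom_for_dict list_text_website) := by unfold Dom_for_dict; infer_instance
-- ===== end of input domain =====

-- B replaces A's per-colon-line backward/forward digit scans by one precomputed sorted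
-- list of digit-line indices walked with a single monotone pointer (objective: alternative).
-- Equivalence is about the RETURN value; neither program mutates its argument.

-- ===== PORT A =====

-- A's inner `while True: ... index_cut -= 1` loop; `fuel` only bounds the recursion and is
-- chosen large enough to cover every index Python visits before it would raise IndexError.
def pvBackScan (xs : List String) (k : Int) : Nat → Int
  | 0 => k
  | fuel + 1 =>
    match PySem.List.pyGet? xs k with
    | none => k  -- Python raises IndexError here; such inputs are outside Pre_for_dict
    | some s => if PySem.Str.strIsdigit s then k else pvBackScan xs (k - 1) fuel

-- A's `while index_val < len(...)` forward loop (`fuel` = remaining indices, a pure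
-- termination artefact: `xs.length - k` steps always suffice).
def pvFwdScanAux (xs : List String) : Nat → Nat → Nat
  | 0, k => k
  | fuel + 1, k =>
    if h : k < xs.length then
      (if PySem.Str.strIsdigit xs[k] then k else pvFwdScanAux xs fuel (k + 1))
    else k
def pvFwdScan (xs : List String) (k : Nat) : Nat := pvFwdScanAux xs (xs.length - k) k

def for_dict (list_text_website : List String) : List (String × String) :=
  ((PySem.List.pyRange 0 list_text_website.length 1).foldl
    (fun (d : PySem.Dict String String) (i : Int) =>
      if PySem.Str.isIn ":" (PySem.List.pyGetD list_text_website i "") then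
        let index_cut : Int := pvBackScan list_text_website i
          (i.toNat + list_text_website.length + 1)
        let end_index : Int := min (i + 1) (index_cut + 3)
        let cut_key : String := PySem.Str.join " "
          (PySem.List.slice list_text_website (some index_cut) (some end_index))
        let index_val : Nat := pvFwdScan list_text_website (i + 1).toNat
        let cut_val : String := PySem.Str.join " "
          (PySem.List.slice list_text_website (some (i + 1)) (some (index_val : Int)))
        d.insert cut_key cut_val
      else d)
    PySem.Dict.empty).items

-- ===== PORT B =====

-- Source B's `while k < len(digs) and digs[k] <= i: k += 1` pointer advance.
def pvAdvAux (digs : List Int) (i : Int) : Nat → Nat → Nat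
  | 0, k => k
  | fuel + 1, k =>
    if h : k < digs.length then
      (if digs[k] ≤ i then pvAdvAux digs i fuel (k + 1) else k)
    else k
def pvAdv (digs : List Int) (k : Nat) (i : Int) : Nat := pvAdvAux digs i (digs.length - k) k

def for_dict_alt (list_text_website : List String) : List (String × String) :=
  let n : Nat := list_text_website.length
  let digs : List Int :=
    ((PySem.List.enumerate list_text_website).filter
      (fun p => PySem.Str.strIsdigit p.2)).map (·.1)
  ((PySem.List.enumerate list_text_website).foldl
    (fun (st : Nat × PySem.Dict String String) (p : Int × String) =>
      if PySem.Str.isIn ":" p.2 then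
        let k : Nat := pvAdv digs st.1 p.1
        if k = 0 then (k, st.2)
        else
          let pi : Int := PySem.List.pyGetD digs ((k : Int) - 1) 0
          let nxt : Int := if k < digs.length then PySem.List.pyGetD digs (k : Int) 0 else (n : Int)
          let key : String := PySem.Str.join " "
            (PySem.List.slice list_text_website (some pi) (some (min (p.1 + 1) (pi + 3))))
          let val : String := PySem.Str.join " "
            (PySem.List.slice list_text_website (some (p.1 + 1)) (some nxt))
          (k, st.2.insert key val)
      else st)
    (0, PySem.Dict.empty)).2.items

-- ===== PRECONDITION & SPEC =====

-- Pre_ excludes exactly the lists in which some ':'-line has no all-digit line at or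
-- before it: there, if the list has no all-digit line at all, A raises IndexError, and
-- otherwise A's backward scan wraps around through negative indexes and keys the entry
-- by an accidental slice cut across the list boundary, a value B (which skips such an
-- unattributable description line) does not reproduce.
def Pre_for_dict (list_text_website : List String) : Prop :=
  ∀ i < list_text_website.length,
    PySem.Str.isIn ":" (list_text_website.getD i "") = true →
    ∃ j ≤ i, PySem.Str.strIsdigit (list_text_website.getD j "") = true
instance (list_text_website : List String) : Decidable (Pre_for_dict list_text_website) := by
  unfold Pre_for_dict; infer_instance

def pvWitness_for_dict : List String := ["200", "OK:", "fine"]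

def Spec_for_dict (list_text_website : List String) (out : List (String × String)) : Prop :=
  out = for_dict_alt list_text_website
instance (list_text_website : List String) (out : List (String × String)) : Decidable (Spec_for_dict list_text_website out) := by
  unfold Spec_for_dict; infer_instance

-- ===== CLAIM (what is proved, stated in full; the proofs are below) =====
def Claim_equal_for_dict : Prop := ∀ (list_text_website : List String), Dom_for_dict list_text_website → Pre_for_dict list_text_website → Spec_for_dict list_text_website (for_dict list_text_website)

-- ===== LEMMAS AND PROOFS =====

-- The two fold bodies, named so the suffix induction can speak about them.
def pvStepA (xs : List String) (d : PySem.Dict String String) (i : Int) : PySem.Dict String String :=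
  if PySem.Str.isIn ":" (PySem.List.pyGetD xs i "") then
    let index_cut : Int := pvBackScan xs i (i.toNat + xs.length + 1)
    let end_index : Int := min (i + 1) (index_cut + 3)
    let cut_key : String := PySem.Str.join " "
      (PySem.List.slice xs (some index_cut) (some end_index))
    let index_val : Nat := pvFwdScan xs (i + 1).toNat
    let cut_val : String := PySem.Str.join " "
      (PySem.List.slice xs (some (i + 1)) (some (index_val : Int)))
    d.insert cut_key cut_val
  else d

-- the digit-index list Source B precomputes, with an arbitrary enumerate start
def pvDigs (xs : List String) (s : Int) : List Int :=
  ((PySem.List.enumerate xs s).filter (fun p => PySem.Str.strIsdigit p.2)).map (·.1)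

def pvStepB (xs : List String) (st : Nat × PySem.Dict String String) (p : Int × String) :
    Nat × PySem.Dict String String :=
  if PySem.Str.isIn ":" p.2 then
    let k : Nat := pvAdv (pvDigs xs 0) st.1 p.1
    if k = 0 then (k, st.2)
    else
      let pi : Int := PySem.List.pyGetD (pvDigs xs 0) ((k : Int) - 1) 0
      let nxt : Int := if k < (pvDigs xs 0).length then PySem.List.pyGetD (pvDigs xs 0) (k : Int) 0 else (xs.length : Int)
      let key : String := PySem.Str.join " "
        (PySem.List.slice xs (some pi) (some (min (p.1 + 1) (pi + 3))))
      let val : String := PySem.Str.join " "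
        (PySem.List.slice xs (some (p.1 + 1)) (some nxt))
      (k, st.2.insert key val)
  else st

theorem for_dict_eq_fold (xs : List String) :
    for_dict xs = ((PySem.List.pyRange 0 xs.length 1).foldl (pvStepA xs) PySem.Dict.empty).items := rfl

theorem for_dict_alt_eq_fold (xs : List String) :
    for_dict_alt xs = ((PySem.List.enumerate xs).foldl (pvStepB xs) (0, PySem.Dict.empty)).2.items := rfl

-- "greatest all-digit index ≤ i" specification (what A's backward scan returns)
def pvPG (xs : List String) (i : Nat) (p : Int) : Prop :=
  0 ≤ p ∧ p ≤ (i : Int) ∧ PySem.Str.strIsdigit (xs.getD p.toNat "") = true ∧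
  ∀ j : Nat, j ≤ i → PySem.Str.strIsdigit (xs.getD j "") = true → (j : Int) ≤ p

-- "least all-digit index ≥ m (or the length)" specification (A's forward scan)
def pvNL (xs : List String) (m : Nat) (r : Int) : Prop :=
  (m : Int) ≤ r ∧ r ≤ (xs.length : Int) ∧
  (r < (xs.length : Int) → PySem.Str.strIsdigit (xs.getD r.toNat "") = true) ∧
  ∀ j : Nat, m ≤ j → (j : Int) < r → PySem.Str.strIsdigit (xs.getD j "") = false

theorem pvPG_unique (xs : List String) (i : Nat) (p q : Int)
    (hp : pvPG xs i p) (hq : pvPG xs i q) : p = q := by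
  obtain ⟨hp0, hpi, hpd, hpm⟩ := hp
  obtain ⟨hq0, hqi, hqd, hqm⟩ := hq
  have h1 : (p.toNat : Int) ≤ q := hqm p.toNat (by omega) (by simpa using hpd)
  have h2 : (q.toNat : Int) ≤ p := hpm q.toNat (by omega) (by simpa using hqd)
  omega

theorem pvNL_unique (xs : List String) (m : Nat) (r t : Int)
    (hr : pvNL xs m r) (ht : pvNL xs m t) : r = t := by
  obtain ⟨hr0, hrn, hrd, hrm⟩ := hr
  obtain ⟨ht0, htn, htd, htm⟩ := ht
  by_contra hne
  rcases lt_or_gt_of_ne hne with h | h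
  · have hd := hrd (by omega)
    have := htm r.toNat (by omega) (by omega)
    rw [this] at hd; exact Bool.noConfusion hd
  · have hd := htd (by omega)
    have := hrm t.toNat (by omega) (by omega)
    rw [this] at hd; exact Bool.noConfusion hd

theorem pvEmpty_not_digit : PySem.Str.strIsdigit "" = false := by decide

-- A's backward scan meets the greatest-digit-index spec (no wrap-around under the hypothesis)
theorem pvBackScan_pg (xs : List String) :
    ∀ (i : Nat), i < xs.length → (∃ j ≤ i, PySem.Str.strIsdigit (xs.getD j "") = true) →
    ∀ fuel, i + 1 ≤ fuel → pvPG xs i (pvBackScan xs (i : Int) fuel) := by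
  intro i
  induction i with
  | zero =>
    intro hi hex fuel hfuel
    obtain ⟨j, hj, hjd⟩ := hex
    interval_cases j
    obtain ⟨f, rfl⟩ : ∃ f, fuel = f + 1 := ⟨fuel - 1, by omega⟩
    have hget : PySem.List.pyGet? xs ((0 : Nat) : Int) = some xs[0] := by
      rw [PySem.List.pyGet?_natCast]; exact List.getElem?_eq_getElem hi
    have hd : PySem.Str.strIsdigit xs[0] = true := by
      simpa [List.getD_eq_getElem?_getD, List.getElem?_eq_getElem hi] using hjd
    simp only [pvBackScan, hget, hd, if_pos]
    exact ⟨le_refl _, le_refl _, by simpa using hjd, fun j hj _ => by omega⟩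
  | succ i ih =>
    intro hi hex fuel hfuel
    obtain ⟨f, rfl⟩ : ∃ f, fuel = f + 1 := ⟨fuel - 1, by omega⟩
    have hget : PySem.List.pyGet? xs ((i + 1 : Nat) : Int) = some xs[i + 1] := by
      rw [PySem.List.pyGet?_natCast]; exact List.getElem?_eq_getElem hi
    by_cases hd : PySem.Str.strIsdigit xs[i + 1] = true
    · simp only [pvBackScan, hget, hd, if_pos]
      refine ⟨by omega, le_refl _, ?_, fun j hj _ => by omega⟩
      simpa [List.getD_eq_getElem?_getD, List.getElem?_eq_getElem hi] using hd
    · have hd' : PySem.Str.strIsdigit (xs.getD (i + 1) "") = false := by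
        simp only [List.getD_eq_getElem?_getD, List.getElem?_eq_getElem hi]
        simpa using hd
      have hex' : ∃ j ≤ i, PySem.Str.strIsdigit (xs.getD j "") = true := by
        obtain ⟨j, hj, hjd⟩ := hex
        refine ⟨j, ?_, hjd⟩
        rcases Nat.lt_or_ge j (i + 1) with h | h
        · omega
        · have : j = i + 1 := by omega
          subst this; rw [hd'] at hjd; exact Bool.noConfusion hjd
      have hstep : pvBackScan xs ((i + 1 : Nat) : Int) (f + 1) = pvBackScan xs (i : Int) f := by
        simp only [pvBackScan, hget, hd, if_neg, Bool.not_eq_true]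
        norm_num
      rw [hstep]
      have hpg := ih (by omega) hex' f (by omega)
      obtain ⟨h0, hle, hdig, hmax⟩ := hpg
      refine ⟨h0, by omega, hdig, fun j hj hjd => ?_⟩
      rcases Nat.lt_or_ge j (i + 1) with h | h
      · exact hmax j (by omega) hjd
      · have : j = i + 1 := by omega
        subst this; rw [hd'] at hjd; exact Bool.noConfusion hjd

-- A's forward scan meets the least-digit-index spec
theorem pvFwdScanAux_nl (xs : List String) :
    ∀ fuel (m : Nat), m ≤ xs.length → xs.length - m ≤ fuel →
    pvNL xs m ((pvFwdScanAux xs fuel m : Nat) : Int) := by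
  intro fuel
  induction fuel with
  | zero =>
    intro m hm hf
    have : m = xs.length := by omega
    subst this
    simp only [pvFwdScanAux]
    exact ⟨le_refl _, le_refl _, fun h => absurd h (by omega), fun j hj hjl => absurd hjl (by omega)⟩
  | succ f ih =>
    intro m hm hf
    by_cases h : m < xs.length
    · by_cases hd : PySem.Str.strIsdigit xs[m] = true
      · simp only [pvFwdScanAux, dif_pos h, hd, if_pos]
        refine ⟨le_refl _, by omega, fun _ => ?_, fun j hj hjl => by omega⟩
        simpa [List.getD_eq_getElem?_getD, List.getElem?_eq_getElem h] using hd
      · have hstep : pvFwdScanAux xs (f + 1) m = pvFwdScanAux xs f (m + 1) := by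
          simp only [pvFwdScanAux, dif_pos h, if_neg hd]
        rw [hstep]
        obtain ⟨h1, h2, h3, h4⟩ := ih (m + 1) (by omega) (by omega)
        refine ⟨by omega, h2, h3, fun j hj hjl => ?_⟩
        rcases Nat.lt_or_ge j (m + 1) with hc | hc
        · have : j = m := by omega
          subst this
          simp only [List.getD_eq_getElem?_getD, List.getElem?_eq_getElem h]
          simpa using hd
        · exact h4 j hc hjl
    · have : m = xs.length := by omega
      subst this
      simp only [pvFwdScanAux, dif_neg h]
      exact ⟨le_refl _, le_refl _, fun h => absurd h (by omega), fun j hj hjl => absurd hjl (by omega)⟩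

theorem pvFwdScan_nl (xs : List String) (m : Nat) (hm : m ≤ xs.length) :
    pvNL xs m ((pvFwdScan xs m : Nat) : Int) :=
  pvFwdScanAux_nl xs (xs.length - m) m hm (le_refl _)

-- structure of the precomputed digit-index list
theorem pvDigs_cons (x : String) (xs : List String) (s : Int) :
    pvDigs (x :: xs) s =
      (if PySem.Str.strIsdigit x then [s] else []) ++ pvDigs xs (s + 1) := by
  simp only [pvDigs, PySem.List.enumerate_cons, List.filter_cons]
  by_cases h : PySem.Str.strIsdigit x = true <;> simp only [PySem.Str.strIsdigit_eq] at h <;> simp [h]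

theorem pvMem_digs (xs : List String) :
    ∀ (s j : Int), j ∈ pvDigs xs s ↔
      ∃ t : Nat, t < xs.length ∧ j = s + t ∧ PySem.Str.strIsdigit (xs.getD t "") = true := by
  induction xs with
  | nil => intro s j; simp [pvDigs, PySem.List.enumerate_nil]
  | cons x xs ih =>
    intro s j
    rw [pvDigs_cons]
    simp only [List.mem_append, ih (s + 1) j]
    constructor
    · rintro (hj | ⟨t, ht, rfl, htd⟩)
      · have hx : PySem.Chars.strIsdigit x.toList = true := by
          by_contra h
          simp [Bool.not_eq_true] at h
          simp [h] at hj
        simp [hx] at hj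
        exact ⟨0, by simp, by omega, by simpa using hx⟩
      · exact ⟨t + 1, by simp; omega, by push_cast; ring, by simpa using htd⟩
    · rintro ⟨t, ht, rfl, htd⟩
      cases t with
      | zero =>
        left
        have hx : PySem.Chars.strIsdigit x.toList = true := by simpa using htd
        simp [hx]
      | succ t =>
        right
        exact ⟨t, by simpa using ht, by push_cast; ring, by simpa using htd⟩

theorem pvSorted_digs (xs : List String) :
    ∀ s : Int, (pvDigs xs s).Pairwise (· < ·) := by
  induction xs with
  | nil => intro s; simp [pvDigs, PySem.List.enumerate_nil]
  | cons x xs ih =>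
    intro s
    rw [pvDigs_cons]
    apply List.pairwise_append.mpr
    refine ⟨by split <;> simp, ih (s + 1), ?_⟩
    intro a ha b hb
    obtain ⟨t, _, rfl, _⟩ := (pvMem_digs xs (s + 1) b).mp hb
    have : a = s := by split at ha <;> simp_all
    omega

-- in a strictly sorted list, the elements ≤ i are exactly the first countP of them
theorem pvSorted_prefix (i : Int) :
    ∀ (l : List Int), l.Pairwise (· < ·) → ∀ (t : Nat) (ht : t < l.length),
      (l[t] ≤ i ↔ t < l.countP (fun j => decide (j ≤ i))) := by
  intro l
  induction l with
  | nil => intro _ t ht; simp at ht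
  | cons x l ih =>
    intro hl t ht
    have hx : ∀ a ∈ l, x < a := (List.pairwise_cons.mp hl).1
    have hl' := (List.pairwise_cons.mp hl).2
    by_cases hxi : x ≤ i
    · have hc : (x :: l).countP (fun j => decide (j ≤ i)) =
          l.countP (fun j => decide (j ≤ i)) + 1 := by
        simp [hxi]
      cases t with
      | zero => simpa [hc] using hxi
      | succ t =>
        have ht' : t < l.length := by simpa using ht
        have := ih hl' t ht'
        simp only [List.getElem_cons_succ, hc]
        omega
    · have hzero : l.countP (fun j => decide (j ≤ i)) = 0 := by
        apply List.countP_eq_zero.mpr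
        intro a ha
        have := hx a ha
        simp; omega
      have hc : (x :: l).countP (fun j => decide (j ≤ i)) = 0 := by
        simp [hxi, hzero]
      cases t with
      | zero => simp [hc]; omega
      | succ t =>
        have ht' : t < l.length := by simpa using ht
        have hgt : i < l[t] := by
          have := hx l[t] (List.getElem_mem ht')
          omega
        simp only [List.getElem_cons_succ, hc]
        omega

-- B's pointer advance lands exactly on countP (· ≤ i)
theorem pvAdvAux_cnt (l : List Int) (hl : l.Pairwise (· < ·)) (i : Int) :
    ∀ fuel k, l.length - k ≤ fuel → k ≤ l.countP (fun j => decide (j ≤ i)) →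
    pvAdvAux l i fuel k = l.countP (fun j => decide (j ≤ i)) := by
  intro fuel
  induction fuel with
  | zero =>
    intro k hf hk
    have hcl := List.countP_le_length (p := fun j => decide (j ≤ i)) (l := l)
    simp only [pvAdvAux]
    omega
  | succ f ih =>
    intro k hf hk
    have hcl := List.countP_le_length (p := fun j => decide (j ≤ i)) (l := l)
    by_cases h : k < l.length
    · by_cases hle : l[k] ≤ i
      · have hk' : k < l.countP (fun j => decide (j ≤ i)) :=
          (pvSorted_prefix i l hl k h).mp hle
        simp only [pvAdvAux, dif_pos h, if_pos hle]
        exact ih (k + 1) (by omega) (by omega)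
      · have : ¬ k < l.countP (fun j => decide (j ≤ i)) := fun hc =>
          hle ((pvSorted_prefix i l hl k h).mpr hc)
        simp only [pvAdvAux, dif_pos h, if_neg hle]
        omega
    · simp only [pvAdvAux, dif_neg h]
      omega

theorem pvAdv_cnt (l : List Int) (hl : l.Pairwise (· < ·)) (i : Int) (k : Nat)
    (hk : k ≤ l.countP (fun j => decide (j ≤ i))) :
    pvAdv l k i = l.countP (fun j => decide (j ≤ i)) :=
  pvAdvAux_cnt l hl i (l.length - k) k (le_refl _) hk

-- a digit index below the length exists wherever strIsdigit holds of getD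
theorem pvDig_lt_length (xs : List String) (j : Nat)
    (hj : PySem.Str.strIsdigit (xs.getD j "") = true) : j < xs.length := by
  by_contra h
  rw [List.getD_eq_getElem?_getD, List.getElem?_eq_none (by omega), Option.getD_none] at hj
  rw [pvEmpty_not_digit] at hj
  exact Bool.noConfusion hj

theorem pvCnt_pos (xs : List String) (i : Nat)
    (hex : ∃ j ≤ i, PySem.Str.strIsdigit (xs.getD j "") = true) :
    0 < (pvDigs xs 0).countP (fun j => decide (j ≤ (i : Int))) := by
  obtain ⟨j, hj, hjd⟩ := hex
  apply List.countP_pos_iff.mpr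
  refine ⟨(j : Int), ?_, by simp; omega⟩
  exact (pvMem_digs xs 0 j).mpr ⟨j, pvDig_lt_length xs j hjd, by omega, hjd⟩

-- B's key index (digs[k-1] after the advance) meets the greatest-digit spec
theorem pvDigs_pg (xs : List String) (i : Nat)
    (hpos : 0 < (pvDigs xs 0).countP (fun j => decide (j ≤ (i : Int)))) :
    pvPG xs i ((pvDigs xs 0).getD
      ((pvDigs xs 0).countP (fun j => decide (j ≤ (i : Int))) - 1) 0) := by
  set l := pvDigs xs 0 with hldef
  set c := l.countP (fun j => decide (j ≤ (i : Int))) with hcdef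
  have hsort : l.Pairwise (· < ·) := pvSorted_digs xs 0
  have hcl : c ≤ l.length := List.countP_le_length
  have hlt : c - 1 < l.length := by omega
  have hget : l.getD (c - 1) 0 = l[c - 1] := List.getD_eq_getElem l 0 hlt
  rw [hget]
  have hmem := (pvMem_digs xs 0 l[c - 1]).mp (List.getElem_mem hlt)
  obtain ⟨t, htl, hteq, htd⟩ := hmem
  have hle : l[c - 1] ≤ (i : Int) := (pvSorted_prefix (i : Int) l hsort (c - 1) hlt).mpr (by omega)
  refine ⟨by omega, hle, ?_, ?_⟩
  · rw [hteq]; simpa using htd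
  · intro j hj hjd
    have hjl : j < xs.length := pvDig_lt_length xs j hjd
    have hjm : (j : Int) ∈ l := (pvMem_digs xs 0 j).mpr ⟨j, hjl, by omega, hjd⟩
    obtain ⟨u, hu, hueq⟩ := List.getElem_of_mem hjm
    have huc : u < c := (pvSorted_prefix (i : Int) l hsort u hu).mp (by rw [hueq]; simp; omega)
    rcases Nat.lt_or_ge u (c - 1) with hcase | hcase
    · have := (List.pairwise_iff_getElem.mp hsort) u (c - 1) hu hlt hcase
      omega
    · have : u = c - 1 := by omega
      subst this; omega

-- B's value bound (digs[k] or the length) meets the least-digit spec at i+1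
theorem pvDigs_nl (xs : List String) (i : Nat) (hi : i < xs.length) :
    pvNL xs (i + 1)
      (if (pvDigs xs 0).countP (fun j => decide (j ≤ (i : Int))) < (pvDigs xs 0).length
       then (pvDigs xs 0).getD ((pvDigs xs 0).countP (fun j => decide (j ≤ (i : Int)))) 0
       else (xs.length : Int)) := by
  set l := pvDigs xs 0 with hldef
  set c := l.countP (fun j => decide (j ≤ (i : Int))) with hcdef
  have hsort : l.Pairwise (· < ·) := pvSorted_digs xs 0
  by_cases h : c < l.length
  · rw [if_pos h]
    have hget : l.getD c 0 = l[c] := List.getD_eq_getElem l 0 h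
    rw [hget]
    have hmem := (pvMem_digs xs 0 l[c]).mp (List.getElem_mem h)
    obtain ⟨t, htl, hteq, htd⟩ := hmem
    have hgt : ¬ (l[c] ≤ (i : Int)) := fun hc =>
      absurd ((pvSorted_prefix (i : Int) l hsort c h).mp hc) (by omega)
    refine ⟨by omega, by omega, fun _ => ?_, ?_⟩
    · rw [hteq]; simpa using htd
    · intro j hj hjl
      by_contra hd
      rw [Bool.not_eq_false] at hd
      have hjlen : j < xs.length := pvDig_lt_length xs j hd
      have hjm : (j : Int) ∈ l := (pvMem_digs xs 0 j).mpr ⟨j, hjlen, by omega, hd⟩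
      obtain ⟨u, hu, hueq⟩ := List.getElem_of_mem hjm
      have huc : u < c := by
        by_contra hun
        rcases Nat.lt_or_ge u c with _ | hun' ; · omega
        rcases Nat.eq_or_lt_of_le hun' with rfl | hlt'
        · omega
        · have := (List.pairwise_iff_getElem.mp hsort) c u h hu hlt'
          omega
      have := (pvSorted_prefix (i : Int) l hsort u hu).mp
      have hja : (j : Int) ≤ (i : Int) := by
        rw [← hueq]
        exact (pvSorted_prefix (i : Int) l hsort u hu).mpr (by omega)
      omega
  · rw [if_neg h]
    refine ⟨by omega, le_refl _, by omega, ?_⟩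
    intro j hj hjl
    by_contra hd
    rw [Bool.not_eq_false] at hd
    have hjlen : j < xs.length := pvDig_lt_length xs j hd
    have hjm : (j : Int) ∈ l := (pvMem_digs xs 0 j).mpr ⟨j, hjlen, by omega, hd⟩
    obtain ⟨u, hu, hueq⟩ := List.getElem_of_mem hjm
    have hja : (j : Int) ≤ (i : Int) := by
      rw [← hueq]
      exact (pvSorted_prefix (i : Int) l hsort u hu).mpr (by omega)
    omega

-- the suffix induction: A's index loop and B's pointer loop build the same dict
theorem pvSuffix (xs : List String)
    (hD : ∀ i < xs.length, PySem.Str.isIn ":" (xs.getD i "") = true →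
      ∃ j ≤ i, PySem.Str.strIsdigit (xs.getD j "") = true) :
    ∀ (suf : List String) (m k : Nat) (d : PySem.Dict String String),
      xs.drop m = suf →
      k ≤ (pvDigs xs 0).countP (fun j => decide (j < (m : Int))) →
      (PySem.List.pyRange (m : Int) (xs.length : Int) 1).foldl (pvStepA xs) d =
      ((PySem.List.enumerate suf (m : Int)).foldl (pvStepB xs) (k, d)).2 := by
  intro suf
  induction suf with
  | nil =>
    intro m k d hdrop hk
    have hlen : xs.length ≤ m := by
      by_contra h
      have := congrArg List.length hdrop
      simp [List.length_drop] at this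
      omega
    rw [PySem.List.pyRange_one_eq_nil (by exact_mod_cast hlen), PySem.List.enumerate_nil]
    rfl
  | cons x rest ih =>
    intro m k d hdrop hk
    have hm : m < xs.length := by
      by_contra h
      rw [List.drop_eq_nil_of_le (by omega)] at hdrop
      exact (List.cons_ne_nil x rest) hdrop.symm
    have hx : xs[m] = x := by
      have h0 : (xs.drop m)[0]? = some x := by rw [hdrop]; rfl
      rw [List.getElem?_drop] at h0
      simpa [List.getElem?_eq_getElem hm] using h0
    have hrest : xs.drop (m + 1) = rest := by
      have h1 := congrArg (List.drop 1) hdrop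
      rw [List.drop_drop] at h1
      simpa [Nat.add_comm] using h1
    have hrange : PySem.List.pyRange (m : Int) (xs.length : Int) 1 =
        (m : Int) :: PySem.List.pyRange ((m : Int) + 1) (xs.length : Int) 1 :=
      PySem.List.pyRange_one_cons (by exact_mod_cast hm)
    have hcast : ((m : Int) + 1) = ((m + 1 : Nat) : Int) := by push_cast; ring
    have hgetm : PySem.List.pyGetD xs (m : Int) "" = x := by
      rw [PySem.List.pyGetD_natCast, List.getD_eq_getElem xs "" hm, hx]
    rw [hrange, PySem.List.enumerate_cons, List.foldl_cons, List.foldl_cons]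
    by_cases hc : PySem.Str.isIn ":" x = true
    · -- description line: both sides insert the same (key, value) pair
      have hex : ∃ j ≤ m, PySem.Str.strIsdigit (xs.getD j "") = true :=
        hD m hm (by rw [List.getD_eq_getElem xs "" hm, hx]; exact hc)
      have hsort := pvSorted_digs xs 0
      have hkc : k ≤ (pvDigs xs 0).countP (fun j => decide (j ≤ (m : Int))) := by
        refine le_trans hk (List.countP_mono_left ?_)
        intro a ha hpa
        simp only [decide_eq_true_eq] at hpa ⊢
        omega
      have hadv : pvAdv (pvDigs xs 0) k (m : Int) =
          (pvDigs xs 0).countP (fun j => decide (j ≤ (m : Int))) :=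
        pvAdv_cnt (pvDigs xs 0) hsort (m : Int) k hkc
      have hpos := pvCnt_pos xs m hex
      have hpgA := pvBackScan_pg xs m hm hex (((m : Int)).toNat + xs.length + 1)
        (by omega)
      have hpgB := pvDigs_pg xs m hpos
      have hic : pvBackScan xs (m : Int) (((m : Int)).toNat + xs.length + 1) =
          (pvDigs xs 0).getD ((pvDigs xs 0).countP (fun j => decide (j ≤ (m : Int))) - 1) 0 :=
        pvPG_unique xs m _ _ hpgA hpgB
      have ht1 : (((m : Int)) + 1).toNat = m + 1 := by omega
      have hnlA := pvFwdScan_nl xs (m + 1) (by omega)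
      have hnlB := pvDigs_nl xs m hm
      have hnxt : ((pvFwdScan xs (m + 1) : Nat) : Int) =
          (if (pvDigs xs 0).countP (fun j => decide (j ≤ (m : Int))) < (pvDigs xs 0).length
           then (pvDigs xs 0).getD ((pvDigs xs 0).countP (fun j => decide (j ≤ (m : Int)))) 0
           else (xs.length : Int)) :=
        pvNL_unique xs (m + 1) _ _ hnlA hnlB
      have hA : pvStepA xs d (m : Int) = d.insert
          (PySem.Str.join " " (PySem.List.slice xs
            (some ((pvDigs xs 0).getD ((pvDigs xs 0).countP (fun j => decide (j ≤ (m : Int))) - 1) 0))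
            (some (min ((m : Int) + 1)
              ((pvDigs xs 0).getD ((pvDigs xs 0).countP (fun j => decide (j ≤ (m : Int))) - 1) 0 + 3)))))
          (PySem.Str.join " " (PySem.List.slice xs (some ((m : Int) + 1))
            (some (if (pvDigs xs 0).countP (fun j => decide (j ≤ (m : Int))) < (pvDigs xs 0).length
                   then (pvDigs xs 0).getD ((pvDigs xs 0).countP (fun j => decide (j ≤ (m : Int)))) 0
                   else (xs.length : Int))))) := by
        simp only [pvStepA, hgetm]
        rw [if_pos hc, ht1, hic, hnxt]
      have e1 : (((pvDigs xs 0).countP (fun j => decide (j ≤ (m : Int))) : Nat) : Int) - 1 =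
          (((pvDigs xs 0).countP (fun j => decide (j ≤ (m : Int))) - 1 : Nat) : Int) := by omega
      have hB : pvStepB xs (k, d) ((m : Int), x) =
          ((pvDigs xs 0).countP (fun j => decide (j ≤ (m : Int))), d.insert
          (PySem.Str.join " " (PySem.List.slice xs
            (some ((pvDigs xs 0).getD ((pvDigs xs 0).countP (fun j => decide (j ≤ (m : Int))) - 1) 0))
            (some (min ((m : Int) + 1)
              ((pvDigs xs 0).getD ((pvDigs xs 0).countP (fun j => decide (j ≤ (m : Int))) - 1) 0 + 3)))))
          (PySem.Str.join " " (PySem.List.slice xs (some ((m : Int) + 1))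
            (some (if (pvDigs xs 0).countP (fun j => decide (j ≤ (m : Int))) < (pvDigs xs 0).length
                   then (pvDigs xs 0).getD ((pvDigs xs 0).countP (fun j => decide (j ≤ (m : Int)))) 0
                   else (xs.length : Int)))))) := by
        simp only [pvStepB]
        rw [if_pos hc, hadv, if_neg (by omega : ¬ (pvDigs xs 0).countP (fun j => decide (j ≤ (m : Int))) = 0),
          e1, PySem.List.pyGetD_natCast, PySem.List.pyGetD_natCast]
      rw [hA, hB, hcast]
      refine ih (m + 1) _ _ hrest ?_
      have hcongr : (pvDigs xs 0).countP (fun j => decide (j ≤ (m : Int))) =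
          (pvDigs xs 0).countP (fun j => decide (j < ((m + 1 : Nat) : Int))) := by
        apply List.countP_congr
        intro a ha
        simp only [decide_eq_true_eq]
        push_cast
        omega
      omega
    · -- not a description line: both sides pass the state through unchanged
      have hA : pvStepA xs d (m : Int) = d := by
        simp only [pvStepA, hgetm]
        rw [if_neg hc]
      have hB : pvStepB xs (k, d) ((m : Int), x) = (k, d) := by
        simp only [pvStepB]
        rw [if_neg hc]
      rw [hA, hB, hcast]
      refine ih (m + 1) k d hrest (le_trans hk (List.countP_mono_left ?_))
      intro a ha hpa
      simp only [decide_eq_true_eq] at hpa ⊢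
      push_cast at hpa ⊢
      omega

theorem for_dict_main : ∀ (xs : List String), Pre_for_dict xs →
    for_dict xs = for_dict_alt xs := by
  intro xs hD
  rw [for_dict_eq_fold, for_dict_alt_eq_fold]
  have := pvSuffix xs hD xs 0 0 PySem.Dict.empty (by simp) (by simp)
  simp only [Nat.cast_zero] at this
  rw [this]

-- ===== VERDICT (by name: the statement is the Claim_ definition above) =====
theorem for_dict_spec : Claim_equal_for_dict := by
  intro xs _ hpre
  exact for_dict_main xs hpre
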